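-- pv_equiv track=rewrite | github.com/atg0831/algo | brute-force/BOJ-3085.py | cal_max_candy
-- ===== SOURCE A (Python) =====
-- def cal_max_candy(candy, N):
--     max_candy=0
--     for row in range(N):
--         row_cnt = []
--         col_cnt = []
--         queue = []
--         for col in range(N):
--             if not queue:
--                 queue.append((candy[row][col], candy[col][row]))
--                 row_cnt.append(1)
--                 col_cnt.append(1)
--                 max_candy=max(max_candy,1)
--                 continue
--
--             row_prev, col_prev = queue.pop()
--             if row_prev == candy[row][col]:
--                 current_cnt = row_cnt.pop()
--                 row_cnt.append(current_cnt+1)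
--                 max_candy=max(max_candy,current_cnt+1)
--             else:
--                 row_cnt.append(1)
--
--             if col_prev == candy[col][row]:
--                 current_cnt = col_cnt.pop()
--                 col_cnt.append(current_cnt+1)
--                 max_candy=max(max_candy,current_cnt+1)
--             else:
--                 col_cnt.append(1)
--
--             queue.append((candy[row][col], candy[col][row]))
--     return max_candy
-- ===== SOURCE B (Python) =====
-- def cal_max_candy(candy, N):
--     def feasible(L):
--         # does some row or column contain a constant window of length L?
--         for i in range(N):
--             for j in range(N - L + 1):
--                 if all(candy[i][j + k] == candy[i][j] for k in range(1, L)):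
--                     return True
--                 if all(candy[j + k][i] == candy[j][i] for k in range(1, L)):
--                     return True
--         return False
--
--     lo, hi = 0, N
--     while lo < hi:
--         mid = (lo + hi + 1) // 2
--         if feasible(mid):
--             lo = mid
--         else:
--             hi = mid - 1
--     return lo
-- ===== Notes on version B (the rewrite author's own statement) =====
-- stated objective: alternative
-- what changed: Replaced the single-pass run-counting loop (queue plus row_cnt/col_cnt stacks) by a binary search on the answer length L, whose feasibility test brute-force checks whether any row or column contains a constant window of length L; no running counter is maintained anywhere.
import Mathlib
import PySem

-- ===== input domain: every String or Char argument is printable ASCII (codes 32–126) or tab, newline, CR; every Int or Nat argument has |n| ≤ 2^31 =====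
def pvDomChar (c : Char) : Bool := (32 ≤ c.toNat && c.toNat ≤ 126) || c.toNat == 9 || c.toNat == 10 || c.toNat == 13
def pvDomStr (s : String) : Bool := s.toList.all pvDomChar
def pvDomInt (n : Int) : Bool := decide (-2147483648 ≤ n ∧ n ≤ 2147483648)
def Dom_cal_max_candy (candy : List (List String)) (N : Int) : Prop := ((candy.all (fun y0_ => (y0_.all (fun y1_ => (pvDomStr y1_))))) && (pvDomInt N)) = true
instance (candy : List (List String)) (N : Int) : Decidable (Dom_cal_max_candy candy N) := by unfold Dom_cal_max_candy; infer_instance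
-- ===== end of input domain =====

-- B replaces A's single-pass run counting (queue + row_cnt/col_cnt stacks) by a binary
-- search on the answer length, whose feasibility test brute-force checks for a constant
-- window of that length in some row or column; a different algorithm, not faster.

-- shared indexing helper: candy[i][j] (in range under Pre_; the .getD defaults are never hit there)
def pvAt (candy : List (List String)) (i j : Int) : String :=
  (PySem.List.pyGet? ((PySem.List.pyGet? candy i).getD []) j).getD ""

-- ===== PORT A =====
def cal_max_candy (candy : List (List String)) (N : Int) : Int :=
  (PySem.List.pyRange 0 N 1).foldl (fun max_candy row =>
    ((PySem.List.pyRange 0 N 1).foldl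
      (fun (st : Int × List Int × List Int × List (String × String)) col =>
        let m := st.1; let row_cnt := st.2.1; let col_cnt := st.2.2.1; let queue := st.2.2.2
        if queue = [] then
          (max m 1, row_cnt ++ [1], col_cnt ++ [1],
           queue ++ [(pvAt candy row col, pvAt candy col row)])
        else
          let prevs := queue.getLast?.getD ("", "")
          let queue2 := queue.dropLast
          let p1 := if prevs.1 = pvAt candy row col then
                      let cur := row_cnt.getLast?.getD 0
                      (max m (cur + 1), row_cnt.dropLast ++ [cur + 1])
                    else (m, row_cnt ++ [1])
          let p2 := if prevs.2 = pvAt candy col row then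
                      let cur := col_cnt.getLast?.getD 0
                      (max p1.1 (cur + 1), col_cnt.dropLast ++ [cur + 1])
                    else (p1.1, col_cnt ++ [1])
          (p2.1, p1.2, p2.2, queue2 ++ [(pvAt candy row col, pvAt candy col row)]))
      (max_candy, ([] : List Int), ([] : List Int), ([] : List (String × String)))).1) 0

-- ===== PORT B =====
-- feasible(L): does some row or column contain a constant window of length L?
-- (the early 'return True's are the two sides of the '||' under List.any)
def pvOk (candy : List (List String)) (N L : Int) : Bool :=
  (PySem.List.pyRange 0 N 1).any (fun i =>
    (PySem.List.pyRange 0 (N - L + 1) 1).any (fun j =>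
      ((PySem.List.pyRange 1 L 1).all (fun k => pvAt candy i (j + k) == pvAt candy i j))
      || ((PySem.List.pyRange 1 L 1).all (fun k => pvAt candy (j + k) i == pvAt candy j i))))

-- the 'while lo < hi' binary-search loop; mid = (lo + hi + 1) // 2
def pvBS (candy : List (List String)) (N lo hi : Int) : Int :=
  if lo < hi then
    if pvOk candy N (PySem.Int.floordiv (lo + hi + 1) 2) then
      pvBS candy N (PySem.Int.floordiv (lo + hi + 1) 2) hi
    else
      pvBS candy N lo (PySem.Int.floordiv (lo + hi + 1) 2 - 1)
  else lo
termination_by (hi - lo).toNat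
decreasing_by
  all_goals
    have h2 := PySem.Int.floordiv_two_mid_bounds (lo := lo + 1) (hi := hi) (by omega)
    have e : lo + 1 + hi = lo + hi + 1 := by ring
    rw [e] at h2
    omega

def cal_max_candy_alt (candy : List (List String)) (N : Int) : Int :=
  pvBS candy N 0 N

-- ===== PRECONDITION & SPEC =====
-- Pre_ excludes exactly the inputs on which Python A raises IndexError:
-- it needs candy[i][j] and candy[j][i] for all 0 ≤ i, j < N.
def Pre_cal_max_candy (candy : List (List String)) (N : Int) : Prop :=
  N ≤ (candy.length : Int) ∧ ∀ r ∈ candy.take N.toNat, N ≤ (r.length : Int)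
instance (candy : List (List String)) (N : Int) : Decidable (Pre_cal_max_candy candy N) := by
  unfold Pre_cal_max_candy; infer_instance

def pvWitness_cal_max_candy : List (List String) × Int := ([["a", "b"], ["a", "a"]], 2)

def Spec_cal_max_candy (candy : List (List String)) (N : Int) (out : Int) : Prop := out = cal_max_candy_alt candy N
instance (candy : List (List String)) (N : Int) (out : Int) : Decidable (Spec_cal_max_candy candy N out) := by unfold Spec_cal_max_candy; infer_instance

-- ===== CLAIM (what is proved, stated in full; the proofs are below) =====
def Claim_equal_cal_max_candy : Prop := ∀ (candy : List (List String)) (N : Int), Dom_cal_max_candy candy N → Pre_cal_max_candy candy N → Spec_cal_max_candy candy N (cal_max_candy candy N)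

-- ===== LEMMAS AND PROOFS =====

-- ---------- A-side: collapse A's stack machinery to a scalar scan ----------

-- A's inner-loop step, named for the proofs (definitionally the lambda inside cal_max_candy)
def pvStepA (candy : List (List String)) (row : Int)
    (st : Int × List Int × List Int × List (String × String)) (col : Int) :
    Int × List Int × List Int × List (String × String) :=
  let m := st.1; let row_cnt := st.2.1; let col_cnt := st.2.2.1; let queue := st.2.2.2
  if queue = [] then
    (max m 1, row_cnt ++ [1], col_cnt ++ [1],
     queue ++ [(pvAt candy row col, pvAt candy col row)])
  else
    let prevs := queue.getLast?.getD ("", "")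
    let queue2 := queue.dropLast
    let p1 := if prevs.1 = pvAt candy row col then
                let cur := row_cnt.getLast?.getD 0
                (max m (cur + 1), row_cnt.dropLast ++ [cur + 1])
              else (m, row_cnt ++ [1])
    let p2 := if prevs.2 = pvAt candy col row then
                let cur := col_cnt.getLast?.getD 0
                (max p1.1 (cur + 1), col_cnt.dropLast ++ [cur + 1])
              else (p1.1, col_cnt ++ [1])
    (p2.1, p1.2, p2.2, queue2 ++ [(pvAt candy row col, pvAt candy col row)])

-- a scalar (best, run, prev) scan, the reference form both sides are reduced to
def pvScan (f : Int → String) (cols : List Int) (st : Int × Int × Option String) :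
    Int × Int × Option String :=
  cols.foldl (fun st j =>
    let c := f j
    let run := if st.2.2 = some c then st.2.1 + 1 else 1
    (max st.1 run, run, some c)) st

-- combined row+column scan: A's inner loop with the stacks collapsed to scalars
def pvCScan (fR fC : Int → String) (cols : List Int)
    (st : Int × Int × Int × String × String) : Int × Int × Int × String × String :=
  cols.foldl (fun st j =>
    let cR := fR j; let cC := fC j
    let m1 := if st.2.2.2.1 = cR then max st.1 (st.2.1 + 1) else st.1
    let rr := if st.2.2.2.1 = cR then st.2.1 + 1 else 1
    let m2 := if st.2.2.2.2 = cC then max m1 (st.2.2.1 + 1) else m1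
    let cr := if st.2.2.2.2 = cC then st.2.2.1 + 1 else 1
    (m2, rr, cr, cR, cC)) st

lemma cal_max_candy_unfold (candy : List (List String)) (N : Int) :
    cal_max_candy candy N =
      (PySem.List.pyRange 0 N 1).foldl (fun m row =>
        (List.foldl (pvStepA candy row) (m, [], [], []) (PySem.List.pyRange 0 N 1)).1) 0 := rfl

lemma pvScan_pull (f : Int → String) (cols : List Int) :
    ∀ a b r p, (pvScan f cols (max a b, r, p)).1 = max a (pvScan f cols (b, r, p)).1 := by
  induction cols with
  | nil => intro a b r p; rfl
  | cons j t ih =>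
      intro a b r p
      simp only [pvScan, List.foldl_cons]
      have h : max (max a b) (if p = some (f j) then r + 1 else 1)
          = max a (max b (if p = some (f j) then r + 1 else 1)) := max_assoc a b _
      rw [h]
      exact ih a _ _ _

lemma pvScan_le (f : Int → String) (cols : List Int) :
    ∀ b r p, b ≤ (pvScan f cols (b, r, p)).1 := by
  induction cols with
  | nil => intro b r p; exact le_refl _
  | cons j t ih =>
      intro b r p
      simp only [pvScan, List.foldl_cons]
      exact le_trans (le_max_left b _) (ih _ _ _)

-- representation: A's inner loop state (m, rcs++[rr], ccs++[cr], [(pr,pc)]) ≙ scalar state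
lemma pvStepA_rep (candy : List (List String)) (r : Int) (cols : List Int) :
    ∀ m rcs ccs rr cr pr pc,
      (List.foldl (pvStepA candy r) (m, rcs ++ [rr], ccs ++ [cr], [(pr, pc)]) cols).1 =
      (pvCScan (fun j => pvAt candy r j) (fun j => pvAt candy j r) cols (m, rr, cr, pr, pc)).1 := by
  induction cols with
  | nil => intro m rcs ccs rr cr pr pc; rfl
  | cons col t ih =>
      intro m rcs ccs rr cr pr pc
      simp only [pvCScan, List.foldl_cons] at ih ⊢
      simp only [pvStepA, List.cons_ne_self, List.getLast?_concat, List.getLast?_singleton,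
        List.dropLast_concat, Option.getD_some, List.nil_append, List.dropLast_singleton]
      by_cases h1 : pr = pvAt candy r col <;> by_cases h2 : pc = pvAt candy col r <;>
        simp only [h1, h2, if_pos, if_neg, not_false_iff] <;> apply ih

-- split the combined scan into a row pass then a column pass (needs 1 ≤ m)
lemma pvCScan_split (fR fC : Int → String) (cols : List Int) :
    ∀ m rr cr pr pc, 1 ≤ m →
      (pvCScan fR fC cols (m, rr, cr, pr, pc)).1 =
      (pvScan fC cols ((pvScan fR cols (m, rr, some pr)).1, cr, some pc)).1 := by
  induction cols with
  | nil => intro m rr cr pr pc hm; rfl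
  | cons j t ih =>
      intro m rr cr pr pc hm
      have pull := pvScan_pull fR t
      have hle := pvScan_le fR t
      simp only [pvScan] at pull hle
      simp only [pvCScan, pvScan, List.foldl_cons, Option.some.injEq] at ih ⊢
      by_cases h1 : pr = fR j <;> by_cases h2 : pc = fC j <;>
        simp only [h1, h2, if_pos, if_neg, not_false_iff]
      · rw [ih _ _ _ _ _ (le_trans hm (le_trans (le_max_left _ _) (le_max_left _ _))),
          max_comm (max m (rr + 1)) (cr + 1), pull (cr + 1) (max m (rr + 1)) (rr + 1) (some (fR j)),
          max_comm (cr + 1) _]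
      · rw [ih _ _ _ _ _ (le_trans hm (le_max_left _ _)),
          max_eq_left (le_trans (le_trans hm (le_max_left m (rr + 1))) (hle _ _ _))]
      · rw [ih _ _ _ _ _ (le_trans hm (le_max_left _ _)), max_eq_left hm,
          max_comm m (cr + 1), pull (cr + 1) m 1 (some (fR j)), max_comm (cr + 1) _]
      · rw [ih _ _ _ _ _ hm, max_eq_left hm,
          max_eq_left (le_trans hm (hle _ _ _))]

-- per-row: A's inner loop = row scan then column scan (nonempty column list)
lemma pvInner_eq (candy : List (List String)) (r c0 : Int) (rest : List Int) (m : Int) :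
    (List.foldl (pvStepA candy r) (m, [], [], []) (c0 :: rest)).1 =
    (pvScan (fun j => pvAt candy j r) (c0 :: rest)
      ((pvScan (fun j => pvAt candy r j) (c0 :: rest) (m, 0, none)).1, 0, none)).1 := by
  have hle := pvScan_le (fun j => pvAt candy r j) rest
  simp only [pvScan] at hle
  have hA : List.foldl (pvStepA candy r) (m, [], [], []) (c0 :: rest) =
      List.foldl (pvStepA candy r)
        (max m 1, ([] : List Int) ++ [1], ([] : List Int) ++ [1],
         [(pvAt candy r c0, pvAt candy c0 r)]) rest := rfl
  rw [hA, pvStepA_rep,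
    pvCScan_split _ _ rest (max m 1) 1 1 (pvAt candy r c0) (pvAt candy c0 r) (le_max_right m 1)]
  simp only [pvScan, List.foldl_cons, reduceCtorEq, if_neg, not_false_iff]
  rw [max_eq_left (le_trans (le_max_right m 1) (hle _ _ _))]

lemma pvFoldl_congr_nonneg (F G : Int → Int → Int)
    (h : ∀ m r, 0 ≤ m → F m r = G m r) (hG : ∀ m r, 0 ≤ m → 0 ≤ G m r) :
    ∀ (l : List Int) (m : Int), 0 ≤ m → l.foldl F m = l.foldl G m := by
  intro l
  induction l with
  | nil => intro m _; rfl
  | cons x t ih =>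
      intro m hm
      simp only [List.foldl_cons]
      rw [h m x hm]
      exact ih _ (hG m x hm)

-- ---------- the window/maximum-run specification ----------

-- a constant window of (integer) length L starting at j
def pvWinAt (g : Int → String) (j L : Int) : Prop :=
  ∀ k : Int, 0 ≤ k → k < L → g (j + k) = g j

-- some constant window of length L inside [0, n)
def pvHasWin (g : Int → String) (n L : Int) : Prop :=
  ∃ j, 0 ≤ j ∧ j + L ≤ n ∧ pvWinAt g j L

-- the scalar scan, indexed by a Nat so it can be analysed by induction
def pvScanN (g : Int → String) (n : Nat) : Int × Int × Option String :=
  (List.range n).foldl (fun st (t : Nat) =>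
    let c := g (t : Int)
    let run := if st.2.2 = some c then st.2.1 + 1 else 1
    (max st.1 run, run, some c)) (0, 0, none)

lemma pvScan_eq_scanN (g : Int → String) (n : Nat) :
    pvScan g (PySem.List.pyRange 0 (n : Int) 1) (0, 0, none) = pvScanN g n := by
  rw [pvScan, pvScanN, PySem.List.pyRange_zero_natCast]
  exact List.foldl_map

lemma pvScanN_succ (g : Int → String) (n : Nat) :
    pvScanN g (n + 1) =
      (max (pvScanN g n).1
         (if (pvScanN g n).2.2 = some (g (n : Int)) then (pvScanN g n).2.1 + 1 else 1),
       (if (pvScanN g n).2.2 = some (g (n : Int)) then (pvScanN g n).2.1 + 1 else 1),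
       some (g (n : Int))) := by
  rw [pvScanN, pvScanN, List.range_succ, List.foldl_append, List.foldl_cons, List.foldl_nil]

lemma pvHasWin_mono (g : Int → String) (n L L' : Int) (h : pvHasWin g n L') (_hL : 0 ≤ L)
    (hLL : L ≤ L') : pvHasWin g n L := by
  obtain ⟨j, hj0, hjL, hw⟩ := h
  exact ⟨j, hj0, by omega, fun k hk0 hk => hw k hk0 (by omega)⟩

-- the scan invariant: (best, run, prev) where best is the maximal window length in [0,n),
-- run the length of the maximal constant suffix of [0,n), prev the last character
lemma pvScanN_inv (g : Int → String) : ∀ n : Nat, ∃ b r : Nat,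
    pvScanN g n = ((b : Int), (r : Int), if n = 0 then none else some (g ((n : Int) - 1))) ∧
    b ≤ n ∧ r ≤ b ∧ (1 ≤ n → 1 ≤ r) ∧
    pvWinAt g ((n : Int) - r) r ∧
    (r < n → g ((n : Int) - r - 1) ≠ g ((n : Int) - r)) ∧
    pvHasWin g n b ∧
    (∀ L : Int, pvHasWin g n L → L ≤ b) := by
  intro n
  induction n with
  | zero =>
      refine ⟨0, 0, rfl, le_rfl, le_rfl, by omega, ?_, by omega, ?_, ?_⟩
      · intro k hk0 hk; exfalso; omega
      · exact ⟨0, le_rfl, by norm_num, fun k hk0 hk => by exfalso; omega⟩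
      · rintro L ⟨j, hj0, hjL, _⟩
        push_cast at hjL ⊢
        omega
  | succ n IH =>
      obtain ⟨b, r, heq, hbn, hrb, hr1, hwrun, hrmax, hwin, hmax⟩ := IH
      by_cases hn0 : n = 0
      · subst hn0
        have hb0 : b = 0 := by omega
        have hr0 : r = 0 := by omega
        subst hb0; subst hr0
        refine ⟨1, 1, ?_, le_rfl, le_rfl, fun _ => le_rfl, ?_, by omega, ?_, ?_⟩
        · rw [pvScanN_succ, heq]
          norm_num
        · intro k hk0 hk
          have hk' : k = 0 := by push_cast at hk; omega
          rw [hk', add_zero]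
        · refine ⟨0, le_rfl, by norm_num, fun k hk0 hk => ?_⟩
          have hk' : k = 0 := by push_cast at hk; omega
          rw [hk', add_zero]
        · rintro L ⟨j, hj0, hjL, _⟩
          push_cast at hjL ⊢
          omega
      · have hn1 : 1 ≤ n := by omega
        have hrpos : 1 ≤ r := hr1 hn1
        by_cases hmatch : g ((n : Int) - 1) = g (n : Int)
        · -- the new character extends the suffix run
          have hwnew : pvWinAt g ((n : Int) - (r : Int)) ((r : Int) + 1) := by
            intro k hk0 hkr
            by_cases hk : k < (r : Int)
            · exact hwrun k hk0 hk
            · have hk' : k = (r : Int) := by omega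
              rw [hk', show ((n : Int) - r + r) = (n : Int) by ring]
              have hlast : g ((n : Int) - 1) = g ((n : Int) - r) := by
                have h := hwrun ((r : Int) - 1) (by omega) (by omega)
                rwa [show ((n : Int) - r + ((r : Int) - 1)) = (n : Int) - 1 by ring] at h
              rw [← hmatch]
              exact hlast
          refine ⟨max b (r + 1), r + 1, ?_, by omega, by omega, fun _ => by omega,
            ?_, ?_, ?_, ?_⟩
          · rw [pvScanN_succ, heq]
            simp only [if_neg hn0, Option.some.injEq, if_pos hmatch, Prod.mk.injEq]
            refine ⟨by push_cast; rfl, by push_cast; rfl, ?_⟩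
            rw [if_neg (Nat.succ_ne_zero n),
              show (((n + 1 : Nat) : Int) - 1) = (n : Int) by push_cast; ring]
          · rw [show (((n + 1 : Nat) : Int) - ((r + 1 : Nat) : Int)) = (n : Int) - r by
              push_cast; ring]
            rw [show (((r + 1 : Nat) : Int)) = (r : Int) + 1 by push_cast; ring]
            exact hwnew
          · intro hlt
            rw [show (((n + 1 : Nat) : Int) - ((r + 1 : Nat) : Int) - 1) = (n : Int) - r - 1 by
                push_cast; ring,
              show (((n + 1 : Nat) : Int) - ((r + 1 : Nat) : Int)) = (n : Int) - r by
                push_cast; ring]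
            exact hrmax (by omega)
          · rcases max_choice b (r + 1) with hmx | hmx <;> rw [hmx]
            · obtain ⟨j, hj0, hjL, hw⟩ := hwin
              exact ⟨j, hj0, by push_cast at hjL ⊢; omega, hw⟩
            · refine ⟨(n : Int) - r, by omega, by push_cast; omega, ?_⟩
              rw [show (((r + 1 : Nat) : Int)) = (r : Int) + 1 by push_cast; ring]
              exact hwnew
          · rintro L ⟨j, hj0, hjL, hw⟩
            push_cast at hjL ⊢
            by_cases hsm : j + L ≤ (n : Int)
            · have := hmax L ⟨j, hj0, hsm, hw⟩
              omega
            · by_cases hLr : L ≤ (r : Int) + 1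
              · omega
              · exfalso
                have hrn : r < n := by omega
                have e1 := hw ((n : Int) - r - 1 - j) (by omega) (by omega)
                have e2 := hw ((n : Int) - r - j) (by omega) (by omega)
                rw [show (j + ((n : Int) - r - 1 - j)) = (n : Int) - r - 1 by ring] at e1
                rw [show (j + ((n : Int) - r - j)) = (n : Int) - r by ring] at e2
                exact hrmax hrn (e1.trans e2.symm)
        · -- mismatch: the run restarts at length 1
          have hb1 : 1 ≤ b := le_trans hrpos hrb
          refine ⟨b, 1, ?_, by omega, hb1, fun _ => le_rfl, ?_, ?_, ?_, ?_⟩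
          · rw [pvScanN_succ, heq]
            simp only [if_neg hn0, Option.some.injEq, if_neg hmatch, Prod.mk.injEq]
            refine ⟨by rw [max_eq_left (by omega : (1:Int) ≤ (b:Int))], by norm_num, ?_⟩
            rw [if_neg (Nat.succ_ne_zero n),
              show (((n + 1 : Nat) : Int) - 1) = (n : Int) by push_cast; ring]
          · intro k hk0 hk
            have hk' : k = 0 := by push_cast at hk; omega
            rw [hk', add_zero]
          · intro _
            rw [show (((n + 1 : Nat) : Int) - ((1 : Nat) : Int) - 1) = (n : Int) - 1 by
                push_cast; ring,
              show (((n + 1 : Nat) : Int) - ((1 : Nat) : Int)) = (n : Int) by push_cast; ring]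
            exact hmatch
          · obtain ⟨j, hj0, hjL, hw⟩ := hwin
            exact ⟨j, hj0, by push_cast at hjL ⊢; omega, hw⟩
          · rintro L ⟨j, hj0, hjL, hw⟩
            push_cast at hjL ⊢
            by_cases hsm : j + L ≤ (n : Int)
            · have := hmax L ⟨j, hj0, hsm, hw⟩
              omega
            · by_cases hL1 : L ≤ 1
              · omega
              · exfalso
                have e1 := hw ((n : Int) - 1 - j) (by omega) (by omega)
                have e2 := hw ((n : Int) - j) (by omega) (by omega)
                rw [show (j + ((n : Int) - 1 - j)) = (n : Int) - 1 by ring] at e1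
                rw [show (j + ((n : Int) - j)) = (n : Int) by ring] at e2
                exact hmatch (e1.trans e2.symm)

-- ---------- grid level: the maximum over all row/column scans ----------

def pvM (candy : List (List String)) (N : Int) : Int :=
  (PySem.List.pyRange 0 N 1).foldl (fun m i =>
    max (max m (pvScanN (fun j => pvAt candy i j) N.toNat).1)
        (pvScanN (fun j => pvAt candy j i) N.toNat).1) 0

lemma pvA_eq_M (candy : List (List String)) (N : Int) (hN : 0 < N) :
    cal_max_candy candy N = pvM candy N := by
  have hl : PySem.List.pyRange 0 N 1 = 0 :: PySem.List.pyRange (0 + 1) N 1 :=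
    PySem.List.pyRange_one_cons hN
  have hscan : ∀ f : Int → String,
      pvScan f (PySem.List.pyRange 0 N 1) (0, 0, none) = pvScanN f N.toNat := by
    intro f
    obtain ⟨n, rfl⟩ : ∃ n : Nat, N = (n : Int) := ⟨N.toNat, by omega⟩
    rw [Int.toNat_natCast]
    exact pvScan_eq_scanN f n
  have hFR : ∀ (f : Int → String) (m : Int), 0 ≤ m →
      (pvScan f (PySem.List.pyRange 0 N 1) (m, 0, none)).1 =
      max m ((pvScan f (PySem.List.pyRange 0 N 1) (0, 0, none)).1) := by
    intro f m hm
    calc (pvScan f (PySem.List.pyRange 0 N 1) (m, 0, none)).1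
        = (pvScan f (PySem.List.pyRange 0 N 1) (max m 0, 0, none)).1 := by
          rw [max_eq_left hm]
      _ = _ := pvScan_pull f (PySem.List.pyRange 0 N 1) m 0 0 none
  rw [cal_max_candy_unfold, pvM]
  refine pvFoldl_congr_nonneg _ _ ?_ ?_ _ 0 le_rfl
  · intro m r hm
    have hRS0 : (0:Int) ≤ (pvScan (fun j => pvAt candy r j) (PySem.List.pyRange 0 N 1) (0, 0, none)).1 :=
      pvScan_le _ _ 0 0 none
    calc (List.foldl (pvStepA candy r) (m, [], [], []) (PySem.List.pyRange 0 N 1)).1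
        = (pvScan (fun j => pvAt candy j r) (PySem.List.pyRange 0 N 1)
            ((pvScan (fun j => pvAt candy r j) (PySem.List.pyRange 0 N 1) (m, 0, none)).1,
              0, none)).1 := by rw [hl]; exact pvInner_eq candy r 0 _ m
      _ = max (max m ((pvScan (fun j => pvAt candy r j) (PySem.List.pyRange 0 N 1) (0,0,none)).1))
            ((pvScan (fun j => pvAt candy j r) (PySem.List.pyRange 0 N 1) (0,0,none)).1) := by
          rw [hFR _ m hm, hFR _ (max m _) (by omega)]
      _ = max (max m (pvScanN (fun j => pvAt candy r j) N.toNat).1)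
            (pvScanN (fun j => pvAt candy j r) N.toNat).1 := by
          rw [hscan, hscan]
  · intro m r hm
    exact le_trans hm (le_trans (le_max_left _ _) (le_max_left _ _))

-- L ≤ (fold of maxes) ↔ L is below the start or below one of the folded values
lemma pvLe_fold_iff (f g : Int → Int) (L : Int) :
    ∀ (l : List Int) (m : Int),
      (L ≤ l.foldl (fun m i => max (max m (f i)) (g i)) m ↔
        L ≤ m ∨ ∃ i ∈ l, L ≤ f i ∨ L ≤ g i) := by
  intro l
  induction l with
  | nil => intro m; simp
  | cons x t ih =>
      intro m
      simp only [List.foldl_cons, ih, le_max_iff, List.mem_cons]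
      constructor
      · rintro (((h | h) | h) | ⟨i, hi, h⟩)
        · exact Or.inl h
        · exact Or.inr ⟨x, Or.inl rfl, Or.inl h⟩
        · exact Or.inr ⟨x, Or.inl rfl, Or.inr h⟩
        · exact Or.inr ⟨i, Or.inr hi, h⟩
      · rintro (h | ⟨i, (rfl | hi), h⟩)
        · exact Or.inl (Or.inl (Or.inl h))
        · rcases h with h | h
          · exact Or.inl (Or.inl (Or.inr h))
          · exact Or.inl (Or.inr h)
        · exact Or.inr ⟨i, hi, h⟩

lemma pvFold_le (f g : Int → Int) (c : Int) :
    ∀ (l : List Int) (m : Int), m ≤ c → (∀ i ∈ l, f i ≤ c ∧ g i ≤ c) →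
      l.foldl (fun m i => max (max m (f i)) (g i)) m ≤ c := by
  intro l
  induction l with
  | nil => intro m hm _; exact hm
  | cons x t ih =>
      intro m hm hfg
      simp only [List.foldl_cons]
      refine ih _ ?_ (fun i hi => hfg i (List.mem_cons_of_mem x hi))
      have := hfg x (List.mem_cons_self)
      exact max_le (max_le hm this.1) this.2

-- pvOk, read as a statement about windows
lemma pvOk_iff (candy : List (List String)) (N L : Int) (_hL : 1 ≤ L) :
    pvOk candy N L = true ↔
      ∃ i, 0 ≤ i ∧ i < N ∧
        (pvHasWin (fun j => pvAt candy i j) N L ∨ pvHasWin (fun j => pvAt candy j i) N L) := by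
  unfold pvOk
  rw [List.any_eq_true]
  constructor
  · rintro ⟨i, hi, hbody⟩
    obtain ⟨hi0, hiN⟩ := PySem.List.mem_pyRange_one.1 hi
    rw [List.any_eq_true] at hbody
    obtain ⟨j, hj, hw⟩ := hbody
    obtain ⟨hj0, hjN⟩ := PySem.List.mem_pyRange_one.1 hj
    refine ⟨i, hi0, hiN, ?_⟩
    rcases Bool.or_eq_true_iff.mp hw with h | h
    · refine Or.inl ⟨j, hj0, by omega, fun k hk0 hkL => ?_⟩
      by_cases hk : k = 0
      · rw [hk, add_zero]
      · exact beq_iff_eq.1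
          (List.all_eq_true.1 h k (PySem.List.mem_pyRange_one.2 ⟨by omega, hkL⟩))
    · refine Or.inr ⟨j, hj0, by omega, fun k hk0 hkL => ?_⟩
      by_cases hk : k = 0
      · rw [hk, add_zero]
      · exact beq_iff_eq.1
          (List.all_eq_true.1 h k (PySem.List.mem_pyRange_one.2 ⟨by omega, hkL⟩))
  · rintro ⟨i, hi0, hiN, h⟩
    refine ⟨i, PySem.List.mem_pyRange_one.2 ⟨hi0, hiN⟩, ?_⟩
    rw [List.any_eq_true]
    rcases h with ⟨j, hj0, hjL, hw⟩ | ⟨j, hj0, hjL, hw⟩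
    · refine ⟨j, PySem.List.mem_pyRange_one.2 ⟨hj0, by omega⟩, Bool.or_eq_true_iff.mpr ?_⟩
      refine Or.inl (List.all_eq_true.2 fun k hk => ?_)
      obtain ⟨hk1, hkL⟩ := PySem.List.mem_pyRange_one.1 hk
      exact beq_iff_eq.2 (hw k (by omega) hkL)
    · refine ⟨j, PySem.List.mem_pyRange_one.2 ⟨hj0, by omega⟩, Bool.or_eq_true_iff.mpr ?_⟩
      refine Or.inr (List.all_eq_true.2 fun k hk => ?_)
      obtain ⟨hk1, hkL⟩ := PySem.List.mem_pyRange_one.1 hk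
      exact beq_iff_eq.2 (hw k (by omega) hkL)

-- line value facts, packaged for grid use
lemma pvLine_iff (g : Int → String) (N L : Int) (hN : 0 ≤ N) (hL : 1 ≤ L) :
    pvHasWin g N L ↔ L ≤ (pvScanN g N.toNat).1 := by
  obtain ⟨b, r, heq, hbn, _, _, _, _, hwin, hmax⟩ := pvScanN_inv g N.toNat
  rw [heq]
  constructor
  · intro h
    exact hmax L (by rwa [Int.toNat_of_nonneg hN])
  · intro h
    have : pvHasWin g ((N.toNat : Int)) L :=
      pvHasWin_mono g _ L b hwin (by omega) h
    rwa [Int.toNat_of_nonneg hN] at this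

lemma pvLine_bounds (g : Int → String) (n : Nat) :
    0 ≤ (pvScanN g n).1 ∧ (pvScanN g n).1 ≤ (n : Int) := by
  obtain ⟨b, r, heq, hbn, _, _, _, _, _, _⟩ := pvScanN_inv g n
  rw [heq]
  constructor
  · show (0 : Int) ≤ (b : Int)
    positivity
  · show (b : Int) ≤ (n : Int)
    exact_mod_cast hbn

-- pvOk agrees with "L ≤ pvM" on 1 ≤ L ≤ N
lemma pvOk_eq_le_M (candy : List (List String)) (N L : Int) (hL : 1 ≤ L) (hLN : L ≤ N) :
    (pvOk candy N L = true ↔ L ≤ pvM candy N) := by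
  have hN : 0 ≤ N := by omega
  rw [pvOk_iff candy N L hL, pvM, pvLe_fold_iff]
  constructor
  · rintro ⟨i, hi0, hiN, h⟩
    refine Or.inr ⟨i, PySem.List.mem_pyRange_one.2 ⟨hi0, hiN⟩, ?_⟩
    rcases h with h | h
    · exact Or.inl ((pvLine_iff _ N L hN hL).1 h)
    · exact Or.inr ((pvLine_iff _ N L hN hL).1 h)
  · rintro (h | ⟨i, hi, h⟩)
    · omega
    · obtain ⟨hi0, hiN⟩ := PySem.List.mem_pyRange_one.1 hi
      refine ⟨i, hi0, hiN, ?_⟩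
      rcases h with h | h
      · exact Or.inl ((pvLine_iff _ N L hN hL).2 h)
      · exact Or.inr ((pvLine_iff _ N L hN hL).2 h)

lemma pvM_bounds (candy : List (List String)) (N : Int) (hN : 0 ≤ N) :
    0 ≤ pvM candy N ∧ pvM candy N ≤ N := by
  constructor
  · rw [pvM, pvLe_fold_iff]; exact Or.inl le_rfl
  · refine pvFold_le _ _ N _ 0 hN (fun i _ => ?_)
    have h1 := pvLine_bounds (fun j => pvAt candy i j) N.toNat
    have h2 := pvLine_bounds (fun j => pvAt candy j i) N.toNat
    constructor <;> omega

-- binary-search correctness: if pvOk decides "L ≤ M" on (lo, hi] then pvBS finds M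
lemma pvBS_correct (candy : List (List String)) (N M : Int)
    (hOk : ∀ L : Int, 1 ≤ L → L ≤ N → (pvOk candy N L = true ↔ L ≤ M)) :
    ∀ d : Nat, ∀ lo hi : Int, (hi - lo).toNat = d →
      0 ≤ lo → lo ≤ M → M ≤ hi → hi ≤ N → pvBS candy N lo hi = M := by
  intro d
  induction d using Nat.strong_induction_on with
  | _ d ih =>
      intro lo hi hd hlo0 hloM hMhi hhiN
      rw [pvBS]
      by_cases hlt : lo < hi
      · rw [if_pos hlt]
        have hmid := PySem.Int.floordiv_two_mid_bounds (lo := lo + 1) (hi := hi) (by omega)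
        rw [show lo + 1 + hi = lo + hi + 1 by ring] at hmid
        set mid := PySem.Int.floordiv (lo + hi + 1) 2 with hmiddef
        have hOkMid := hOk mid (by omega) (by omega)
        by_cases hfeas : pvOk candy N mid = true
        · rw [if_pos hfeas]
          exact ih _ (by omega) mid hi rfl (by omega) (hOkMid.1 hfeas) hMhi hhiN
        · rw [if_neg hfeas]
          have : ¬ mid ≤ M := fun h => hfeas (hOkMid.2 h)
          exact ih _ (by omega) lo (mid - 1) rfl hlo0 hloM (by omega) (by omega)
      · rw [if_neg hlt]
        omega

-- ===== VERDICT (by name: the statement is the Claim_ definition above) =====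
theorem cal_max_candy_spec : Claim_equal_cal_max_candy := by
  intro candy N _hdom _hpre
  unfold Spec_cal_max_candy cal_max_candy_alt
  by_cases hN : 0 < N
  · have hb := pvM_bounds candy N (by omega)
    rw [pvA_eq_M candy N hN,
      pvBS_correct candy N (pvM candy N) (fun L h1 h2 => pvOk_eq_le_M candy N L h1 h2)
        (N - 0).toNat 0 N rfl le_rfl hb.1 hb.2 le_rfl]
  · rw [cal_max_candy_unfold, PySem.List.pyRange_one_eq_nil (by omega), pvBS,
      if_neg (by omega : ¬ (0:Int) < N)]
    rfl
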